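-- pv_equiv track=rewrite | github.com/HENZUsec/security-automation-pipeline | python/analysis_engine.py | scan_windows_services
-- ===== SOURCE A (Python) =====
-- RISKY_SERVICES = {
--     "RemoteRegistry": ("HIGH", "increases attack surface"),
--     "Telnet": ("HIGH", "insecure protocol"),
--     "Spooler": ("MEDIUM", "common hardening target"),
--     "TermService": ("MEDIUM", "RDP service, review exposure"),
--     "LanmanServer": ("MEDIUM", "SMB server, review exposure"),
-- }
--
-- SEV_SCORE = {"LOW": 1, "MEDIUM": 2, "HIGH": 3, "CRITICAL": 4}
--
-- SEV_ORDER = {"LOW": 1, "MEDIUM": 2, "HIGH": 3, "CRITICAL": 4}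
--
-- def add_finding(findings, severity, text):
--     findings.append((severity, text))
--
-- def scan_windows_services(rows, findings):
--     score = 0
--     highest = "LOW"
--
--     # Check each service against risky service list
--     for row in rows:
--         name = (row.get("Name") or "").strip()
--         if not name:
--             continue
--
--         if name in RISKY_SERVICES:
--             sev, reason = RISKY_SERVICES[name]
--             state = (row.get("State") or "").strip()
--             startmode = (row.get("StartMode") or "").strip()
--             add_finding(findings, sev, f"Windows service: {name} (State={state}, StartMode={startmode}) ({reason})")
--             score += SEV_SCORE.get(sev, 0)
--             if SEV_ORDER[sev] > SEV_ORDER[highest]: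
--                 highest = sev
--
--     return score, highest
-- ===== SOURCE B (Python) =====
-- RISKY_SERVICES = {
--     "RemoteRegistry": ("HIGH", "increases attack surface"),
--     "Telnet": ("HIGH", "insecure protocol"),
--     "Spooler": ("MEDIUM", "common hardening target"),
--     "TermService": ("MEDIUM", "RDP service, review exposure"),
--     "LanmanServer": ("MEDIUM", "SMB server, review exposure"),
-- }
--
-- SEV_SCORE = {"LOW": 1, "MEDIUM": 2, "HIGH": 3, "CRITICAL": 4}
--
-- SEV_ORDER = {"LOW": 1, "MEDIUM": 2, "HIGH": 3, "CRITICAL": 4}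
--
--
-- def scan_windows_services(rows, findings):
--     # Stage 1: select the risky hits (the empty name is never a risky key,
--     # so no separate emptiness test is needed).
--     hits = [(n, row)
--             for row in rows
--             for n in [(row.get("Name") or "").strip()]
--             if n in RISKY_SERVICES]
--     # Stage 2: emit the findings for the hits, in order.
--     for n, row in hits:
--         sev, reason = RISKY_SERVICES[n]
--         state = (row.get("State") or "").strip()
--         startmode = (row.get("StartMode") or "").strip()
--         findings.append((sev, f"Windows service: {n} (State={state}, StartMode={startmode}) ({reason})"))
--     # Stage 3: aggregate over the matched severities.
--     sevs = [RISKY_SERVICES[n][0] for n, _ in hits]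
--     score = sum(SEV_SCORE[s] for s in sevs)
--     highest = max(sevs, key=SEV_ORDER.__getitem__, default="LOW")
--     return score, highest
-- ===== Notes on version B (the rewrite author's own statement) =====
-- stated objective: alternative
-- what changed: Replaced A's fused single-pass score/highest accumulator with a staged pipeline: a comprehension first selects the risky hits (dropping A's redundant emptiness test, since the empty name is never a risky key), then findings are emitted from the hit list, and score/highest are computed by a separate sum and max(..., key=SEV_ORDER.__getitem__, default='LOW').
import Mathlib
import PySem

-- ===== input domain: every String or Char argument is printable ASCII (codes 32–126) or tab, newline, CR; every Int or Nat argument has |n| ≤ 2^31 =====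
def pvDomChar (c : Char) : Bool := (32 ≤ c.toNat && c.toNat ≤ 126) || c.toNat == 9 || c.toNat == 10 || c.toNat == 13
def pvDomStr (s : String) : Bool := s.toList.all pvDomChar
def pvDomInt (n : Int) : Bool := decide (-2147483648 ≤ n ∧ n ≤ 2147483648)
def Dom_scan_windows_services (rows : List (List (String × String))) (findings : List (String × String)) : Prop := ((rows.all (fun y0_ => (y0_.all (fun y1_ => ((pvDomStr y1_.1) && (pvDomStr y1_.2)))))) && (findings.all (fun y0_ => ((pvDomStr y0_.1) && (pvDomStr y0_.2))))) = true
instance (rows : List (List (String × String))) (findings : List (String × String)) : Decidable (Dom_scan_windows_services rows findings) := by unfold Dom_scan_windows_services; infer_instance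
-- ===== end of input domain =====

-- B replaces A's fused running (score, highest) accumulator with a staged pipeline:
-- select the risky hits first (no separate emptiness test — "" is never a risky key),
-- then aggregate score by a sum over the mapped severities and highest by max(..., default="LOW").
-- NOTE: the Python function also appends findings to `findings` in place (identically in A and B);
-- the equivalence proved here is about the RETURN value (score, highest) only.

-- shared module constants (RISKY_SERVICES, SEV_SCORE, SEV_ORDER; distinct literal keys)
def pvRisky : PySem.Dict String (String × String) := PySem.Dict.mk
  [("RemoteRegistry", ("HIGH", "increases attack surface")),
   ("Telnet", ("HIGH", "insecure protocol")),
   ("Spooler", ("MEDIUM", "common hardening target")),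
   ("TermService", ("MEDIUM", "RDP service, review exposure")),
   ("LanmanServer", ("MEDIUM", "SMB server, review exposure"))]

def pvSevScore : PySem.Dict String Int := PySem.Dict.mk
  [("LOW", 1), ("MEDIUM", 2), ("HIGH", 3), ("CRITICAL", 4)]

def pvSevOrder : PySem.Dict String Int := PySem.Dict.mk
  [("LOW", 1), ("MEDIUM", 2), ("HIGH", 3), ("CRITICAL", 4)]

-- ===== PORT A =====
-- fused loop: running (score, highest) accumulator.  SEV_ORDER[sev]/[highest] never raises
-- (sev and highest are always keys of SEV_ORDER), so getD _ 0 is exact there.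
def scan_windows_services (rows : List (List (String × String))) (findings : List (String × String)) : Int × String :=
  let _ := findings  -- mutated in place in Python (append); not part of the return value
  rows.foldl (fun acc row =>
    let name := PySem.Str.strip (((PySem.Dict.mk row).get? "Name").getD "")
    if name = "" then acc
    else
      match pvRisky.get? name with
      | some (sev, _reason) =>
          (acc.1 + pvSevScore.getD sev 0,
           if pvSevOrder.getD acc.2 0 < pvSevOrder.getD sev 0 then sev else acc.2)
      | none => acc) (0, "LOW")

-- ===== PORT B =====
-- staged pipeline: hits comprehension (filterMap), then sevs, then a separate sum and max.
-- RISKY_SERVICES[n] / SEV_SCORE[s] never raise here (keys always present), so getD is exact;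
-- the findings-emitting loop of Source B is pure mutation and contributes nothing to the return value.
def scan_windows_services_alt (rows : List (List (String × String))) (findings : List (String × String)) : Int × String :=
  let _ := findings
  let hits : List (String × List (String × String)) := rows.filterMap (fun row =>
    let n := PySem.Str.strip (((PySem.Dict.mk row).get? "Name").getD "")
    if pvRisky.contains n then some (n, row) else none)
  let sevs := hits.map (fun h => (pvRisky.getD h.1 ("", "")).1)
  ((sevs.map (fun s => pvSevScore.getD s 0)).sum,
   PySem.List.maxD sevs (fun s => pvSevOrder.getD s 0) "LOW")

-- ===== PRECONDITION & SPEC =====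
def Spec_scan_windows_services (rows : List (List (String × String))) (findings : List (String × String)) (out : Int × String) : Prop := out = scan_windows_services_alt rows findings
instance (rows : List (List (String × String))) (findings : List (String × String)) (out : Int × String) : Decidable (Spec_scan_windows_services rows findings out) := by unfold Spec_scan_windows_services; infer_instance

-- ===== CLAIM (what is proved, stated in full; the proofs are below) =====
def Claim_equal_scan_windows_services : Prop := ∀ (rows : List (List (String × String))) (findings : List (String × String)), Dom_scan_windows_services rows findings → Spec_scan_windows_services rows findings (scan_windows_services rows findings)

-- ===== LEMMAS AND PROOFS =====

-- the severity a row contributes, if any (characterises both versions' match test)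
def pvSevOfRow (row : List (String × String)) : Option String :=
  let name := PySem.Str.strip (((PySem.Dict.mk row).get? "Name").getD "")
  if name = "" then none else (pvRisky.get? name).map Prod.fst

def pvKey (s : String) : Int := pvSevOrder.getD s 0

-- cleaned-up form of A's loop body
def pvStepA (acc : Int × String) (row : List (String × String)) : Int × String :=
  match pvSevOfRow row with
  | some sev => (acc.1 + pvSevScore.getD sev 0, if pvKey acc.2 < pvKey sev then sev else acc.2)
  | none => acc

theorem pvStepA_eq : (fun (acc : Int × String) (row : List (String × String)) =>
    let name := PySem.Str.strip (((PySem.Dict.mk row).get? "Name").getD "")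
    if name = "" then acc
    else
      match pvRisky.get? name with
      | some (sev, _reason) =>
          (acc.1 + pvSevScore.getD sev 0,
           if pvSevOrder.getD acc.2 0 < pvSevOrder.getD sev 0 then sev else acc.2)
      | none => acc) = pvStepA := by
  funext acc row
  unfold pvStepA pvSevOfRow pvKey
  by_cases hn : PySem.Str.strip (((PySem.Dict.mk row).get? "Name").getD "") = ""
  · simp [hn]
  · cases hg : pvRisky.get? (PySem.Str.strip (((PySem.Dict.mk row).get? "Name").getD "")) with
    | none => simp [hn, hg]
    | some p => cases p; simp [hn, hg]

-- B's hit-then-severity pipeline yields exactly the filterMap of pvSevOfRow per row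
theorem pvHitSev_eq (row : List (String × String)) :
    ((let n := PySem.Str.strip (((PySem.Dict.mk row).get? "Name").getD "")
      if pvRisky.contains n then some (n, row) else none).map
        (fun h : String × List (String × String) => (pvRisky.getD h.1 ("", "")).1))
    = pvSevOfRow row := by
  unfold pvSevOfRow
  by_cases hc : pvRisky.contains (PySem.Str.strip (((PySem.Dict.mk row).get? "Name").getD "")) = true
  · have hne : PySem.Str.strip (((PySem.Dict.mk row).get? "Name").getD "") ≠ "" := by
      intro h; rw [h] at hc; exact absurd hc (by decide)
    cases hg : pvRisky.get? (PySem.Str.strip (((PySem.Dict.mk row).get? "Name").getD "")) with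
    | none =>
      have := PySem.Dict.contains_eq_isSome_get? pvRisky
        (PySem.Str.strip (((PySem.Dict.mk row).get? "Name").getD ""))
      rw [hg] at this; rw [this] at hc; simp at hc
    | some p =>
      simp [hc, hne, hg, PySem.Dict.getD_eq_get?_getD]
  · rw [Bool.not_eq_true] at hc
    have hg : pvRisky.get? (PySem.Str.strip (((PySem.Dict.mk row).get? "Name").getD "")) = none := by
      have := PySem.Dict.contains_eq_isSome_get? pvRisky
        (PySem.Str.strip (((PySem.Dict.mk row).get? "Name").getD ""))
      rw [hc] at this
      exact Option.not_isSome_iff_eq_none.mp (by rw [← this]; simp)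
    simp [hc, hg]

theorem pvSevs_eq (rows : List (List (String × String))) :
    ((rows.filterMap (fun row =>
        let n := PySem.Str.strip (((PySem.Dict.mk row).get? "Name").getD "")
        if pvRisky.contains n then some (n, row) else none)).map
          (fun h : String × List (String × String) => (pvRisky.getD h.1 ("", "")).1))
    = rows.filterMap pvSevOfRow := by
  rw [List.map_filterMap]
  exact List.filterMap_congr (fun row _ => pvHitSev_eq row)

-- shifting the initial accumulator out of the score fold
theorem pvScore_shift (xs : List String) (a b : Int) :
    xs.foldl (fun s sev => s + pvSevScore.getD sev 0) (a + b)
      = a + xs.foldl (fun s sev => s + pvSevScore.getD sev 0) b := by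
  induction xs generalizing b with
  | nil => simp
  | cons x t ih => simp only [List.foldl_cons, add_assoc, ih]

-- the score fold is the sum of the mapped scores
theorem pvScore_sum (xs : List String) :
    xs.foldl (fun s sev => s + pvSevScore.getD sev 0) 0
      = (xs.map (fun s => pvSevScore.getD s 0)).sum := by
  induction xs with
  | nil => simp
  | cons x t ih =>
    rw [List.foldl_cons, List.map_cons, List.sum_cons, zero_add,
        show pvSevScore.getD x 0 = pvSevScore.getD x 0 + 0 by ring,
        pvScore_shift, ih, add_zero]

-- A's fused fold computes the two separate folds over the matched list
theorem pvFused_eq (rows : List (List (String × String))) (s : Int) (h : String) :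
    rows.foldl pvStepA (s, h)
    = (s + (rows.filterMap pvSevOfRow).foldl (fun a sev => a + pvSevScore.getD sev 0) 0,
       (rows.filterMap pvSevOfRow).foldl (fun m sev => if pvKey m < pvKey sev then sev else m) h) := by
  induction rows generalizing s h with
  | nil => simp
  | cons row rest ih =>
    cases hsev : pvSevOfRow row with
    | none =>
      have hstep : pvStepA (s, h) row = (s, h) := by unfold pvStepA; rw [hsev]
      simp only [List.foldl_cons, List.filterMap_cons, hsev, hstep, ih]
    | some sev =>
      have hstep : pvStepA (s, h) row
          = (s + pvSevScore.getD sev 0, if pvKey h < pvKey sev then sev else h) := by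
        unfold pvStepA; rw [hsev]
      simp only [List.foldl_cons, List.filterMap_cons, hsev, hstep, ih]
      rw [zero_add,
          show pvSevScore.getD sev 0 = pvSevScore.getD sev 0 + 0 by ring,
          pvScore_shift, add_zero, add_assoc]

-- one max? step folds the head pair into its running maximum
theorem pvMaxStep (a x : String) (t : List String) :
    PySem.List.max? (a :: x :: t) (fun s => pvKey s)
      = PySem.List.max? ((if pvKey a < pvKey x then x else a) :: t) (fun s => pvKey s) := by
  by_cases h : pvKey a < pvKey x <;> simp [PySem.List.max?, h]

-- the running-max fold is max? of the list with its start consed on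
theorem pvFold_eq_max? (t : List String) (a : String) :
    t.foldl (fun m x => if pvKey m < pvKey x then x else m) a
      = (PySem.List.max? (a :: t) (fun s => pvKey s)).getD "LOW" := by
  induction t generalizing a with
  | nil => simp [PySem.List.max?]
  | cons x t ih =>
    rw [List.foldl_cons, ih (if pvKey a < pvKey x then x else a), ← pvMaxStep]

-- A's running max from "LOW" agrees with max(..., default="LOW") when every key beats pvKey "LOW" = 1
theorem pvMax_eq (xs : List String) (hx : ∀ x ∈ xs, (1:Int) < pvKey x) :
    xs.foldl (fun m sev => if pvKey m < pvKey sev then sev else m) "LOW"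
      = PySem.List.maxD xs (fun s => pvKey s) "LOW" := by
  cases xs with
  | nil => rfl
  | cons x t =>
    have hx1 : (1:Int) < pvKey x := hx x (by simp)
    have h0 : pvKey "LOW" < pvKey x := by
      have : pvKey "LOW" = 1 := by decide
      omega
    rw [List.foldl_cons, if_pos h0, pvFold_eq_max? t x]
    rfl

-- every matched severity is a value of RISKY_SERVICES, so its SEV_ORDER key is 2 or 3
theorem pvMatched_key (rows : List (List (String × String))) :
    ∀ sev ∈ rows.filterMap pvSevOfRow, (1:Int) < pvKey sev := by
  intro sev hmem
  rcases List.mem_filterMap.mp hmem with ⟨row, _, hrow⟩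
  unfold pvSevOfRow at hrow
  by_cases hn : PySem.Str.strip (((PySem.Dict.mk row).get? "Name").getD "") = ""
  · simp [hn] at hrow
  · rw [if_neg hn] at hrow
    cases hg : pvRisky.get? (PySem.Str.strip (((PySem.Dict.mk row).get? "Name").getD "")) with
    | none => rw [hg] at hrow; simp at hrow
    | some p =>
      rw [hg] at hrow
      simp only [Option.map_some, Option.some.injEq] at hrow
      have hp := PySem.Dict.mem_items_of_get?_eq_some pvRisky hg
      unfold pvRisky at hp
      simp only [List.mem_cons, List.not_mem_nil, or_false, Prod.mk.injEq] at hp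
      rcases hp with ⟨-, h⟩ | ⟨-, h⟩ | ⟨-, h⟩ | ⟨-, h⟩ | ⟨-, h⟩ <;>
        (subst h; rw [← hrow]; decide)

-- ===== VERDICT (by name: the statement is the Claim_ definition above) =====
theorem scan_windows_services_spec : Claim_equal_scan_windows_services := by
  intro rows findings _
  simp only [Spec_scan_windows_services, scan_windows_services, scan_windows_services_alt]
  rw [pvStepA_eq, pvSevs_eq, pvFused_eq rows 0 "LOW", zero_add, pvScore_sum,
      pvMax_eq _ (pvMatched_key rows)]
  rfl
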